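-- pv_equiv track=rewrite | github.com/lazogrowth-glitch/vocalype | vocalype-brain/scripts/generate_handoff_task.py | _is_vague
-- ===== SOURCE A (Python) =====
-- from typing import Any
--
-- def _is_vague(proposed_changes: list[Any]) -> bool:
--     """Return True if the proposed_changes list is empty or too generic."""
--     if not proposed_changes:
--         return True
--     vague_markers = ("improve", "update", "fix", "change", "enhance", "refactor")
--     specific_enough = False
--     for change in proposed_changes:
--         text = str(change).lower()
--         # A change is specific if it mentions a file, a state name, a component, a function,
--         # or a concrete UI element — not just a generic verb with no noun.
--         if any(c in text for c in (".", "tsx", "ts", "component", "hook", "state",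
--                                     "button", "message", "error", "label", "icon",
--                                     "activat", "license", "session", "dictation")):
--             specific_enough = True
--             break
--     if not specific_enough:
--         # Fallback: if every change is only a short vague phrase
--         for change in proposed_changes:
--             if len(str(change).split()) > 8:
--                 specific_enough = True
--                 break
--     return not specific_enough
-- ===== SOURCE B (Python) =====
-- def _is_vague(proposed_changes):
--     """Return True if the proposed_changes list is empty or too generic."""
--     markers = (".", "tsx", "ts", "component", "hook", "state",
--                "button", "message", "error", "label", "icon",
--                "activat", "license", "session", "dictation")
--
--     def specific(change):
--         text = str(change).lower()
--         return any(m in text for m in markers) or len(str(change).split()) > 8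
--
--     return not any(specific(change) for change in proposed_changes)
-- ===== Notes on version B (the rewrite author's own statement) =====
-- stated objective: simpler
-- what changed: Single pass with one per-change 'specific' predicate (marker substring OR >8 words) combined via not any(...), replacing the empty-list guard, the flag variable and the two separate break loops.
import Mathlib
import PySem

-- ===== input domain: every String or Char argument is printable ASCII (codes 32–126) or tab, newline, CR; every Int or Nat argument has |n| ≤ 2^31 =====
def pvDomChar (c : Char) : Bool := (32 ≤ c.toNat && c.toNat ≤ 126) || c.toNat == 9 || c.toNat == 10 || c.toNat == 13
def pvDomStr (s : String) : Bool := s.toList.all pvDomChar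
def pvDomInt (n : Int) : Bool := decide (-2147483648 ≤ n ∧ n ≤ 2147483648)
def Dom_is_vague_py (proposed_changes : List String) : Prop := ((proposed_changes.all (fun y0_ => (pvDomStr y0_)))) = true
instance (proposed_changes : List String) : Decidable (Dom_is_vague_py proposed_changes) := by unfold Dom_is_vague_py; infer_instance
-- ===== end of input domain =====

-- B is a simpler decomposition of A: one pass with a single per-change predicate instead of
-- an empty-list guard, a flag variable and two separate break loops. Same values everywhere.

-- ===== PORT A =====
def aVagueKeywords : List String :=
  [".", "tsx", "ts", "component", "hook", "state",
   "button", "message", "error", "label", "icon",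
   "activat", "license", "session", "dictation"]

-- first loop of A: break (→ true) on the first change whose lowered text contains a keyword
def aLoop1 : List String → Bool
  | [] => false
  | change :: rest =>
    let text := PySem.Str.lower change
    if aVagueKeywords.any (fun c => PySem.Str.isIn c text) then true else aLoop1 rest

-- fallback loop of A: break (→ true) on the first change with more than 8 words
def aLoop2 : List String → Bool
  | [] => false
  | change :: rest =>
    if (PySem.Str.split₀ change).length > 8 then true else aLoop2 rest

def is_vague_py (proposed_changes : List String) : Bool :=
  if proposed_changes = [] then true
  else
    let specific₁ := aLoop1 proposed_changes
    let specific₂ := if specific₁ then specific₁ else aLoop2 proposed_changes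
    !specific₂

-- ===== PORT B =====
def bMarkers : List String :=
  [".", "tsx", "ts", "component", "hook", "state",
   "button", "message", "error", "label", "icon",
   "activat", "license", "session", "dictation"]

def bSpecific (change : String) : Bool :=
  let text := PySem.Str.lower change
  bMarkers.any (fun m => PySem.Str.isIn m text) || (PySem.Str.split₀ change).length > 8

def is_vague_py_alt (proposed_changes : List String) : Bool :=
  !(proposed_changes.any bSpecific)

-- ===== PRECONDITION & SPEC =====
def Spec_is_vague_py (proposed_changes : List String) (out : Bool) : Prop := out = is_vague_py_alt proposed_changes
instance (proposed_changes : List String) (out : Bool) : Decidable (Spec_is_vague_py proposed_changes out) := by unfold Spec_is_vague_py; infer_instance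

-- ===== CLAIM (what is proved, stated in full; the proofs are below) =====
def Claim_equal_is_vague_py : Prop := ∀ (proposed_changes : List String), Dom_is_vague_py proposed_changes → Spec_is_vague_py proposed_changes (is_vague_py proposed_changes)

-- ===== LEMMAS AND PROOFS =====

lemma aLoop1_eq_any (xs : List String) :
    aLoop1 xs = xs.any (fun c => aVagueKeywords.any (fun m => PySem.Str.isIn m (PySem.Str.lower c))) := by
  induction xs with
  | nil => rfl
  | cons x rest ih =>
    simp only [aLoop1, List.any_cons, ih]
    cases h : (aVagueKeywords.any fun c => PySem.Str.isIn c (PySem.Str.lower x)) <;>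
      simp

lemma aLoop2_eq_any (xs : List String) :
    aLoop2 xs = xs.any (fun c => decide ((PySem.Str.split₀ c).length > 8)) := by
  induction xs with
  | nil => rfl
  | cons x rest ih =>
    simp only [aLoop2, List.any_cons, ih]
    cases h : decide ((PySem.Str.split₀ x).length > 8) <;>
      simp [h]

lemma any_or_distrib {α : Type} (f g : α → Bool) (xs : List α) :
    xs.any (fun x => f x || g x) = (xs.any f || xs.any g) := by
  induction xs with
  | nil => rfl
  | cons x rest ih =>
    simp only [List.any_cons, ih]
    cases f x <;> cases g x <;> simp

-- ===== VERDICT (by name: the statement is the Claim_ definition above) =====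
theorem is_vague_py_spec : Claim_equal_is_vague_py := by
  intro xs _
  unfold Spec_is_vague_py is_vague_py is_vague_py_alt
  by_cases hnil : xs = []
  · subst hnil; rfl
  · simp only [hnil, if_false]
    have : xs.any bSpecific = (aLoop1 xs || aLoop2 xs) := by
      rw [aLoop1_eq_any, aLoop2_eq_any, ← any_or_distrib]
      rfl
    rw [this]
    cases h1 : aLoop1 xs <;> simp
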